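-- pv_equiv track=rewrite | github.com/apathetic-tools/serger | src/serger/module_actions.py | _apply_move_action
-- ===== SOURCE A (Python) =====
-- def _transform_module_name(  # noqa: PLR0911
--     module_name: str,
--     source: str,
--     dest: str,
--     mode: "ModuleActionMode",
-- ) -> str | None:
--     """Transform a single module name based on action.
--
--     Handles preserve vs flatten modes:
--     - preserve: Keep structure (apathetic_logs.utils -> grinch.utils)
--     - flatten: Remove intermediate levels (apathetic_logs.utils -> grinch)
--
--     Args:
--         module_name: The module name to transform
--         source: Source module path (e.g., "apathetic_logs")
--         dest: Destination module path (e.g., "grinch")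
--         mode: Transformation mode ("preserve" or "flatten")
--
--     Returns:
--         Transformed module name, or None if module doesn't match source
--     """
--     # Check if module_name starts with source
--     if not module_name.startswith(source):
--         return None
--
--     # Exact match: source -> dest
--     if module_name == source:
--         return dest
--
--     # Check if it's a submodule (must have a dot after source)
--     if not module_name.startswith(f"{source}."):
--         return None
--
--     # Extract the suffix (everything after source.)
--     suffix = module_name[len(source) + 1 :]
--
--     if mode == "preserve":
--         # Preserve structure: dest + suffix
--         return f"{dest}.{suffix}"
--
--     # mode == "flatten"
--     # Flatten: dest + last component only
--     # e.g., "apathetic_logs.utils.text" -> "grinch.text"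
--     # e.g., "apathetic_logs.utils.schema.validator" -> "grinch.validator"
--     if "." in suffix:
--         # Multiple levels: take only the last component
--         last_component = suffix.split(".")[-1]
--         return f"{dest}.{last_component}"
--
--     # Single level: dest + suffix
--     return f"{dest}.{suffix}"
--
-- def _apply_move_action(
--     module_names: list[str],
--     action: "ModuleActionFull",
-- ) -> list[str]:
--     """Apply move action with preserve or flatten mode.
--
--     Moves modules from source to dest, removing source modules.
--     Handles preserve vs flatten modes.
--
--     Args:
--         module_names: List of module names to transform
--         action: Move action with source, dest, and mode
--
--     Returns:
--         Transformed list of module names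
--     """
--     source = action["source"]  # pyright: ignore[reportTypedDictNotRequiredAccess]
--     dest = action.get("dest")
--     if dest is None:
--         msg = "Move action requires 'dest' field"
--         raise ValueError(msg)
--
--     mode = action.get("mode", "preserve")
--     if mode not in ("preserve", "flatten"):
--         msg = f"Invalid mode '{mode}', must be 'preserve' or 'flatten'"
--         raise ValueError(msg)
--
--     result: list[str] = []
--     for module_name in module_names:
--         transformed = _transform_module_name(module_name, source, dest, mode)
--         if transformed is not None:
--             # Replace source module with transformed name
--             result.append(transformed)
--         else:
--             # Keep modules that don't match source
--             result.append(module_name)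
--
--     return result
-- ===== SOURCE B (Python) =====
-- def _rewrite(name, src_parts, dest, mode):
--     parts = name.split(".")
--     k = len(src_parts)
--     if parts[:k] != src_parts:
--         return name
--     if len(parts) == k:
--         return dest
--     if mode == "preserve":
--         return ".".join([dest] + parts[k:])
--     return ".".join([dest, parts[-1]])
--
--
-- def _apply_move_action(module_names, action):
--     source = action["source"]
--     dest = action.get("dest")
--     if dest is None:
--         raise ValueError("Move action requires 'dest' field")
--     mode = action.get("mode", "preserve")
--     if mode not in ("preserve", "flatten"):
--         raise ValueError(f"Invalid mode '{mode}', must be 'preserve' or 'flatten'")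
--     src_parts = source.split(".")
--     return [_rewrite(name, src_parts, dest, mode) for name in module_names]
-- ===== Notes on version B (the rewrite author's own statement) =====
-- stated objective: idiomatic
-- what changed: B matches on dotted components: each name is split on '.' once and compared component-wise against source.split('.'), rebuilding output with '.'.join, instead of A's chain of string-prefix tests, index slicing and per-branch suffix splitting.
import Mathlib
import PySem

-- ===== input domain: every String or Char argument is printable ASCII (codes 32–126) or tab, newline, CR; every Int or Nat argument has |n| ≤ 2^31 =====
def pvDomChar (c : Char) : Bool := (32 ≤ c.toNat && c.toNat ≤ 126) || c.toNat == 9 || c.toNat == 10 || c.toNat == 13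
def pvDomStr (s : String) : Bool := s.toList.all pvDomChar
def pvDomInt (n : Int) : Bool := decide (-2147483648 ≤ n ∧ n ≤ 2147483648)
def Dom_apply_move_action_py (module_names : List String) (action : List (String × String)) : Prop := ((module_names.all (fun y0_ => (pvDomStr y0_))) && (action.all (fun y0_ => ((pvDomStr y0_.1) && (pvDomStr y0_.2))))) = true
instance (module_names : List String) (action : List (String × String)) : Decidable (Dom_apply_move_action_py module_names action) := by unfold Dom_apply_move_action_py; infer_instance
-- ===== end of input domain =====

-- B rewrites module names by dotted components (split once, compare component-wise, '.'.join the result)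
-- instead of A's chain of string-prefix tests and index slicing; objective: idiomatic, same cost.

-- ===== PORT A =====
-- _transform_module_name; string operations are performed on code-point lists (PySem.Chars are the
-- definitions behind PySem.Str); f"{x}.{y}" is exact code-point concatenation x ++ '.' :: y.
def transform_module_name_py (module_name source dest mode : String) : Option String :=
  if !(PySem.Chars.startswith module_name.toList source.toList) then none
  else if module_name.toList = source.toList then some dest
  else if !(PySem.Chars.startswith module_name.toList (source.toList ++ ['.'])) then none
  else
    let suffix := PySem.Chars.slice module_name.toList (some ((source.toList.length : Int) + 1)) none
    if mode.toList = "preserve".toList then some (String.ofList (dest.toList ++ '.' :: suffix))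
    else if PySem.Chars.isIn ['.'] suffix then
      -- suffix.split(".")[-1]: the separator "." is nonempty and a split result is never the
      -- empty list, so splitOn/getLastD are exact here
      some (String.ofList (dest.toList ++ '.' :: (PySem.Chars.splitOn suffix ['.']).getLastD []))
    else some (String.ofList (dest.toList ++ '.' :: suffix))

def apply_move_action_py (module_names : List String) (action : List (String × String)) : List String :=
  let source := (PySem.Dict.get? (PySem.Dict.mk action) "source").getD ""  -- Pre_ excludes the KeyError
  let dest := (PySem.Dict.get? (PySem.Dict.mk action) "dest").getD ""      -- Pre_ excludes the ValueError (missing dest)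
  let mode := PySem.Dict.getD (PySem.Dict.mk action) "mode" "preserve"
  -- Pre_ excludes the ValueError for a mode outside {"preserve","flatten"}
  module_names.foldl (fun result module_name =>
    match transform_module_name_py module_name source dest mode with
    | some t => result ++ [t]
    | none => result ++ [module_name]) []

-- ===== PORT B =====
-- _rewrite from Source B: match on dotted components
def rewrite_alt (name : String) (src_parts : List (List Char)) (dest mode : String) : String :=
  let parts := PySem.Chars.splitOn name.toList ['.']
  let k := src_parts.length
  if parts.take k ≠ src_parts then name
  else if parts.length = k then dest
  else if mode.toList = "preserve".toList then
    String.ofList (PySem.Chars.join ['.'] (dest.toList :: parts.drop k))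
  else
    -- parts[-1]: a split result is never empty, so getLastD is exact
    String.ofList (PySem.Chars.join ['.'] [dest.toList, parts.getLastD []])

def apply_move_action_py_alt (module_names : List String) (action : List (String × String)) : List String :=
  let source := (PySem.Dict.get? (PySem.Dict.mk action) "source").getD ""
  let dest := (PySem.Dict.get? (PySem.Dict.mk action) "dest").getD ""
  let mode := PySem.Dict.getD (PySem.Dict.mk action) "mode" "preserve"
  let src_parts := PySem.Chars.splitOn source.toList ['.']
  module_names.map (fun name => rewrite_alt name src_parts dest mode)

-- ===== PRECONDITION & SPEC =====
-- Pre_ excludes exactly the inputs on which the Python A raises: a missing "source" key (KeyError),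
-- a missing "dest" key (ValueError), or a "mode" value outside {"preserve","flatten"} (ValueError).
def Pre_apply_move_action_py (module_names : List String) (action : List (String × String)) : Prop :=
  (PySem.Dict.get? (PySem.Dict.mk action) "source").isSome = true ∧
  (PySem.Dict.get? (PySem.Dict.mk action) "dest").isSome = true ∧
  (PySem.Dict.getD (PySem.Dict.mk action) "mode" "preserve" = "preserve" ∨
   PySem.Dict.getD (PySem.Dict.mk action) "mode" "preserve" = "flatten")
instance (module_names : List String) (action : List (String × String)) : Decidable (Pre_apply_move_action_py module_names action) := by unfold Pre_apply_move_action_py; infer_instance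

def pvWitness_apply_move_action_py : List String × (List (String × String)) :=
  (["apathetic_logs.utils.text", "apathetic_logs", "other.mod"],
   [("source", "apathetic_logs"), ("dest", "grinch"), ("mode", "flatten")])

def Spec_apply_move_action_py (module_names : List String) (action : List (String × String)) (out : List String) : Prop := out = apply_move_action_py_alt module_names action
instance (module_names : List String) (action : List (String × String)) (out : List String) : Decidable (Spec_apply_move_action_py module_names action out) := by unfold Spec_apply_move_action_py; infer_instance

-- ===== CLAIM (what is proved, stated in full; the proofs are below) =====
def Claim_equal_apply_move_action_py : Prop := ∀ (module_names : List String) (action : List (String × String)), Dom_apply_move_action_py module_names action → Pre_apply_move_action_py module_names action → Spec_apply_move_action_py module_names action (apply_move_action_py module_names action)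

-- ===== LEMMAS AND PROOFS =====

def sp : List Char → List (List Char)
  | [] => [[]]
  | c :: r =>
    if c = '.' then [] :: sp r
    else match sp r with
      | p :: ps => (c :: p) :: ps
      | [] => [[c]]
theorem sp_ne_nil (l : List Char) : sp l ≠ [] := by
  cases l with
  | nil => simp [sp]
  | cons c r =>
    simp only [sp]
    split_ifs with h
    · simp
    · cases hr : sp r <;> simp
theorem go_eq (fuel : Nat) (l cur : List Char) (acc : List (List Char)) (h : l.length < fuel) :
    PySem.Chars.splitOn.go ['.'] fuel l cur acc
      = acc.reverse ++ ((cur.reverse ++ (sp l).headI) :: (sp l).tail) := by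
  induction fuel generalizing l cur acc with
  | zero => omega
  | succ fuel ih =>
    cases l with
    | nil =>
      rw [PySem.Chars.splitOn.go.eq_def]
      simp [sp]
    | cons c rest =>
      rw [PySem.Chars.splitOn.go.eq_def]
      simp only [List.isPrefixOf, Bool.and_true]
      obtain ⟨p, ps, hr⟩ : ∃ p ps, sp rest = p :: ps := by
        cases hsp : sp rest with
        | nil => exact absurd hsp (sp_ne_nil rest)
        | cons p ps => exact ⟨p, ps, rfl⟩
      by_cases hc : c = '.'
      · subst hc
        have hsp : sp ('.' :: rest) = [] :: sp rest := by simp [sp]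
        rw [if_pos (by simp), ih (List.drop ['.'].length ('.' :: rest)) [] (cur.reverse :: acc)
              (by simp at h ⊢; omega)]
        simp only [List.length_cons, List.length_nil, List.drop_succ_cons, List.drop_zero,
          hsp, hr, List.reverse_cons, List.reverse_nil, List.headI, List.tail_cons,
          List.append_assoc, List.nil_append, List.cons_append, List.append_nil]
      · have hbeq : ('.' == c) = false := beq_eq_false_iff_ne.mpr (fun e => hc e.symm)
        have hsp : sp (c :: rest) = (c :: p) :: ps := by simp [sp, hc, hr]
        rw [if_neg (by simp [hbeq]), ih rest (c :: cur) acc (by simp at h; omega)]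
        simp only [hsp, hr, List.reverse_cons, List.headI, List.tail_cons,
          List.append_assoc, List.nil_append, List.cons_append, List.append_nil]


theorem sp_cons_dot (r : List Char) : sp ('.' :: r) = [] :: sp r := by simp [sp]

theorem sp_cons_ne (c : Char) (r p : List Char) (ps : List (List Char)) (hc : ¬ c = '.')
    (hr : sp r = p :: ps) : sp (c :: r) = (c :: p) :: ps := by simp [sp, hc, hr]

theorem sp_exists (r : List Char) : ∃ p ps, sp r = p :: ps := by
  cases hsp : sp r with
  | nil => exact absurd hsp (sp_ne_nil r)
  | cons p ps => exact ⟨p, ps, rfl⟩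

theorem sp_eq (l : List Char) : PySem.Chars.splitOn l ['.'] = sp l := by
  unfold PySem.Chars.splitOn
  rw [go_eq _ _ _ _ (by omega)]
  obtain ⟨p, ps, hr⟩ := sp_exists l
  simp [hr]

theorem sp_append (a b : List Char) : sp (a ++ '.' :: b) = sp a ++ sp b := by
  induction a with
  | nil => simp [sp_cons_dot, sp]
  | cons c a ih =>
    by_cases hc : c = '.'
    · subst hc
      rw [List.cons_append, sp_cons_dot, sp_cons_dot, ih, List.cons_append]
    · obtain ⟨p, ps, hr⟩ := sp_exists a
      obtain ⟨q, qs, hq⟩ := sp_exists b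
      rw [List.cons_append, sp_cons_ne c _ p (ps ++ sp b) hc (by rw [ih, hr]; simp),
        sp_cons_ne c a p ps hc hr]
      simp

theorem sp_join (l : List Char) : PySem.Chars.join ['.'] (sp l) = l := by
  induction l with
  | nil => simp [sp, PySem.Chars.join, List.intercalate]
  | cons c r ih =>
    obtain ⟨p, ps, hr⟩ := sp_exists r
    by_cases hc : c = '.'
    · subst hc
      rw [sp_cons_dot, hr, PySem.Chars.join_cons_cons, ← hr, ih]
      simp
    · rw [sp_cons_ne c r p ps hc hr]
      rw [hr] at ih
      cases ps with
      | nil =>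
        rw [PySem.Chars.join_singleton] at ih ⊢
        rw [← ih]
      | cons q qs =>
        rw [PySem.Chars.join_cons_cons] at ih ⊢
        rw [← ih]
        simp

theorem sp_of_no_dot (l : List Char) (h : '.' ∉ l) : sp l = [l] := by
  induction l with
  | nil => simp [sp]
  | cons c r ih =>
    simp only [List.mem_cons, not_or] at h
    have hc : ¬ c = '.' := fun e => h.1 e.symm
    rw [sp_cons_ne c r r [] hc (ih h.2)]

theorem join_append (ps qs : List (List Char)) (hp : ps ≠ []) (hq : qs ≠ []) :
    PySem.Chars.join ['.'] (ps ++ qs) = PySem.Chars.join ['.'] ps ++ '.' :: PySem.Chars.join ['.'] qs := by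
  induction ps with
  | nil => exact absurd rfl hp
  | cons p ps ih =>
    cases ps with
    | nil =>
      cases qs with
      | nil => exact absurd rfl hq
      | cons q qs =>
        rw [List.singleton_append, PySem.Chars.join_cons_cons, PySem.Chars.join_singleton]
        simp
    | cons p' ps' =>
      simp only [List.cons_append]
      rw [PySem.Chars.join_cons_cons, PySem.Chars.join_cons_cons]
      have ih' := ih (by simp)
      simp only [List.cons_append] at ih'
      rw [ih']
      simp

-- further structural facts about sp

theorem sp_take_append (st t : List Char) :
    (sp (st ++ '.' :: t)).take (sp st).length = sp st := by
  rw [sp_append]; exact List.take_left ..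

theorem sp_drop_append (st t : List Char) :
    (sp (st ++ '.' :: t)).drop (sp st).length = sp t := by
  rw [sp_append]; exact List.drop_left ..

theorem sp_inj {a b : List Char} (h : sp a = sp b) : a = b := by
  rw [← sp_join a, ← sp_join b, h]

-- if sp s is a take-prefix of sp n then n is s itself or a dotted extension of s
theorem take_eq_cases (n s : List Char) (h : (sp n).take (sp s).length = sp s) :
    n = s ∨ ∃ t, n = s ++ '.' :: t := by
  have hlen : (sp s).length ≤ (sp n).length := by
    by_contra hlt
    have hlt : (sp n).length < (sp s).length := by omega
    have := List.take_of_length_le (le_of_lt hlt)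
    rw [this] at h
    have := congrArg List.length h
    omega
  rcases Nat.eq_or_lt_of_le hlen with heq | hlt
  · left
    have : sp n = sp s := by
      rw [← h]
      exact (List.take_of_length_le (le_of_eq heq.symm)).symm
    exact sp_inj this
  · right
    have hsplit : sp n = sp s ++ (sp n).drop (sp s).length := by
      conv_lhs => rw [← List.take_append_drop (sp s).length (sp n)]
      rw [h]
    have hrest : (sp n).drop (sp s).length ≠ [] := by
      intro hnil
      have := congrArg List.length hsplit
      simp [hnil] at this
      omega
    refine ⟨PySem.Chars.join ['.'] ((sp n).drop (sp s).length), ?_⟩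
    have := sp_join n
    rw [hsplit, join_append _ _ (sp_ne_nil s) hrest, sp_join s] at this
    exact this.symm

theorem join_cons_of_ne_nil (d : List Char) (qs : List (List Char)) (hq : qs ≠ []) :
    PySem.Chars.join ['.'] (d :: qs) = d ++ '.' :: PySem.Chars.join ['.'] qs := by
  have := join_append [d] qs (by simp) hq
  rw [PySem.Chars.join_singleton] at this
  simpa using this

-- per-module-name agreement of the two transforms
theorem per_name (name source dest mode : String) :
    (match transform_module_name_py name source dest mode with
     | some t => t
     | none => name)
      = rewrite_alt name (PySem.Chars.splitOn source.toList ['.']) dest mode := by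
  simp only [rewrite_alt, sp_eq]
  by_cases h1 : ∃ t, name.toList = source.toList ++ '.' :: t
  · -- dotted submodule of source
    obtain ⟨t, hn⟩ := h1
    have hne : ¬ name.toList = source.toList := by
      intro he
      have := congrArg List.length (he.symm.trans hn)
      simp at this
    have hsw1 : PySem.Chars.startswith name.toList source.toList = true :=
      (PySem.Chars.startswith_iff _ _).mpr ⟨'.' :: t, hn.symm⟩
    have hsw2 : PySem.Chars.startswith name.toList (source.toList ++ ['.']) = true :=
      (PySem.Chars.startswith_iff _ _).mpr ⟨t, by rw [hn]; simp⟩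
    have hsuffix : PySem.Chars.slice name.toList (some ((source.toList.length : Int) + 1)) none
        = t := by
      rw [PySem.Chars.slice_eq_listSlice]
      have hc : ((source.toList.length : Int) + 1) = (((source.toList.length + 1 : Nat)) : Int) := by
        push_cast; ring
      rw [hc, PySem.List.slice_from_natCast, hn]
      have h2 : source.toList ++ '.' :: t = (source.toList ++ ['.']) ++ t := by simp
      have hl : source.toList.length + 1 = (source.toList ++ ['.']).length := by simp
      rw [h2, hl]
      exact List.drop_left ..
    have htake : (sp name.toList).take (sp source.toList).length = sp source.toList := by
      rw [hn]; exact sp_take_append ..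
    have hdrop : (sp name.toList).drop (sp source.toList).length = sp t := by
      rw [hn]; exact sp_drop_append ..
    have hlen : ¬ (sp name.toList).length = (sp source.toList).length := by
      intro he
      have := congrArg List.length hdrop
      rw [List.length_drop, he] at this
      simp at this
      exact sp_ne_nil t (List.eq_nil_of_length_eq_zero this.symm)
    have hjoin2 : ∀ x : List Char,
        PySem.Chars.join ['.'] [dest.toList, x] = dest.toList ++ '.' :: x := by
      intro x
      rw [join_cons_of_ne_nil _ _ (by simp), PySem.Chars.join_singleton]
    simp only [transform_module_name_py]
    rw [hsw1, hsw2, hsuffix, htake, hdrop]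
    rw [if_neg (show ¬ (sp source.toList ≠ sp source.toList) by simp)]
    rw [if_neg hlen]
    simp only [Bool.not_true, Bool.false_eq_true, if_false, if_neg hne]
    by_cases hm : mode.toList = "preserve".toList
    · simp only [if_pos hm]
      rw [join_cons_of_ne_nil _ _ (sp_ne_nil t), sp_join]
    · simp only [if_neg hm]
      have hlast : (sp name.toList).getLastD [] = (sp t).getLastD [] := by
        rw [hn, sp_append]
        simp only [List.getLastD_eq_getLast?, List.getLast?_append_of_ne_nil _ (sp_ne_nil t)]
      by_cases hin : PySem.Chars.isIn ['.'] t = true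
      · simp only [if_pos hin, sp_eq]
        rw [hjoin2, hlast]
      · simp only [if_neg hin]
        rw [hjoin2, hlast, sp_of_no_dot t (fun hmem =>
          hin ((PySem.Chars.isIn_iff_infix _ _).mpr ((List.singleton_infix_iff '.' t).mpr hmem)))]
        simp
  · by_cases h2 : name.toList = source.toList
    · -- exact match of source: both return dest
      have hsw1 : PySem.Chars.startswith name.toList source.toList = true :=
        (PySem.Chars.startswith_iff _ _).mpr (h2 ▸ List.prefix_refl _)
      have htake : (sp name.toList).take (sp source.toList).length = sp source.toList := by
        rw [h2]; exact List.take_of_length_le (le_refl _)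
      simp only [transform_module_name_py]
      rw [hsw1, htake]
      rw [if_neg (show ¬ (sp source.toList ≠ sp source.toList) by simp)]
      rw [if_pos (show (sp name.toList).length = (sp source.toList).length by rw [h2])]
      simp only [Bool.not_true, Bool.false_eq_true, if_false, if_pos h2]
    · -- no match: both keep the name
      have htake : ¬ (sp name.toList).take (sp source.toList).length = sp source.toList := by
        intro he
        rcases take_eq_cases _ _ he with h | h
        · exact h2 h
        · exact h1 h
      rw [if_pos (show (sp name.toList).take (sp source.toList).length ≠ sp source.toList
            from htake)]
      simp only [transform_module_name_py]
      by_cases hsw1 : PySem.Chars.startswith name.toList source.toList = true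
      · have hsw2 : ¬ PySem.Chars.startswith name.toList (source.toList ++ ['.']) = true := by
          intro hsw
          obtain ⟨t, ht⟩ := (PySem.Chars.startswith_iff _ _).mp hsw
          exact h1 ⟨t, by simp [← ht]⟩
        rw [hsw1, if_neg h2]
        simp only [Bool.not_true, Bool.false_eq_true, if_false]
        rw [if_pos (show (!PySem.Chars.startswith name.toList (source.toList ++ ['.'])) = true
              by simpa using hsw2)]
      · rw [if_pos (show (!PySem.Chars.startswith name.toList source.toList) = true
              by simpa using hsw1)]

-- A's append-to-result loop is the map B performs
theorem foldl_match_eq_map (f : String → Option String) (l acc : List String) :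
    l.foldl (fun result module_name =>
      match f module_name with
      | some t => result ++ [t]
      | none => result ++ [module_name]) acc
      = acc ++ l.map (fun module_name =>
          match f module_name with
          | some t => t
          | none => module_name) := by
  induction l generalizing acc with
  | nil => simp
  | cons x xs ih =>
    simp only [List.foldl_cons, List.map_cons]
    cases f x <;> simp [ih]

-- ===== VERDICT (by name: the statement is the Claim_ definition above) =====
theorem apply_move_action_py_spec : Claim_equal_apply_move_action_py := by
  intro module_names action _ _
  unfold Spec_apply_move_action_py apply_move_action_py apply_move_action_py_alt
  rw [foldl_match_eq_map]
  simp only [List.nil_append]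
  exact List.map_congr_left (fun name _ => per_name name _ _ _)
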